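-- pv_equiv track=rewrite | github.com/kittilsenstian-debug/the-hand | theory-tools/all_fibers_physics.py | theta4_mod_p
-- ===== SOURCE A (Python) =====
-- import math
--
-- def theta4_mod_p(q, p, N=None):
--     """
--     θ₄(q) = 1 + 2·∑_{n=1}^{N} (-1)ⁿ·q^{n²} mod p.
--     """
--     if N is None:
--         N = int(math.sqrt(p)) + 5
--
--     result = 1
--     for n in range(1, N + 1):
--         qn2 = pow(q, n * n, p)
--         sign = 1 if n % 2 == 0 else p - 1  # (-1)^n mod p
--         result = (result + 2 * sign * qn2) % p
--     return result
-- ===== SOURCE B (Python) =====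
-- import math
--
-- def theta4_mod_p(q, p, N=None):
--     """
--     theta4(q) = 1 + 2*sum_{n=1}^{N} (-1)^n * q^(n^2) mod p, computed with
--     incremental modular exponentiation: q^(n^2) is maintained by multiplying
--     by q^(2n+1) each step, so no modular pow with a large exponent is needed.
--     """
--     if N is None:
--         N = int(math.sqrt(p)) + 5
--     if N < 1:
--         return 1
--     cur = q % p            # q^(n^2) mod p, n = 1
--     mul = q ** 3 % p       # q^(2n+1) mod p, n = 1
--     qsq = q * q % p        # q^2 mod p
--     acc = -cur % p         # sum_{m=1}^{n} (-1)^m q^(m^2) mod p, n = 1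
--     for n in range(2, N + 1):
--         cur = cur * mul % p
--         mul = mul * qsq % p
--         acc = (acc + cur if n % 2 == 0 else acc - cur) % p
--     return (1 + 2 * acc) % p
-- ===== Notes on version B (the rewrite author's own statement) =====
-- stated objective: faster
-- what changed: Replaces the per-term modular exponentiation pow(q, n*n, p) by an incremental recurrence that maintains q^(n^2) mod p (multiply by q^(2n+1), itself updated by q^2), accumulates the signed sum, and applies the constant term and factor 2 once at the end.
import Mathlib
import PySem

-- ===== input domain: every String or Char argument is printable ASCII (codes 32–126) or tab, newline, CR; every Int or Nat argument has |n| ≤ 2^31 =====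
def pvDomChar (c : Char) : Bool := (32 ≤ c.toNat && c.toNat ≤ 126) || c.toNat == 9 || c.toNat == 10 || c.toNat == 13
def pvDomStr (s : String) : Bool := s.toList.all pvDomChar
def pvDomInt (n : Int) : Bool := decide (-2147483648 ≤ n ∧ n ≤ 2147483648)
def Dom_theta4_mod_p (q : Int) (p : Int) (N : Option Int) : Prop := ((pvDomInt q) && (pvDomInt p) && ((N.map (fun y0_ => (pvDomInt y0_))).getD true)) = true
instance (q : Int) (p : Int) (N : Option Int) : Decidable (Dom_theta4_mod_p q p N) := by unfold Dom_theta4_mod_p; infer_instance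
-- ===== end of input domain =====

-- B replaces A's per-term modular exponentiation pow(q, n*n, p) by an incremental
-- recurrence maintaining q^(n^2) mod p (objective: faster, O(N) modular multiplications).

-- ===== PORT A =====
-- Python's three-argument pow(b, e, m) is binary (square-and-multiply) modular
-- exponentiation; PySem.Int.powMod is definitionally mod (b^e) m, which cannot be
-- evaluated for the ~2^31-sized exponents the default N produces, so the port uses
-- the same square-and-multiply scheme CPython does; pvPowMod_eq (below) proves it
-- equal to PySem.Int.powMod on every input, so the port is exact.
def pvPowMod (b : Int) (e : Nat) (m : Int) : Int :=
  if h : e = 0 then PySem.Int.mod 1 m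
  else
    let hm := pvPowMod b (e / 2) m
    let h2 := PySem.Int.mod (hm * hm) m
    if e % 2 = 0 then h2 else PySem.Int.mod (h2 * b) m
decreasing_by exact Nat.div_lt_self (Nat.pos_of_ne_zero h) (by omega)

def theta4_mod_p (q : Int) (p : Int) (N : Option Int) : Int :=
  -- int(math.sqrt(p)) ported as Nat.sqrt p.toNat: exact for 0 ≤ p ≤ 2^31 (IEEE double
  -- sqrt is correctly rounded there); Pre_ guarantees 0 < p whenever N is none.
  let Nv : Int := match N with
    | none => ((Nat.sqrt p.toNat : Nat) : Int) + 5
    | some n => n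
  (PySem.List.pyRange 1 (Nv + 1)).foldl
    (fun result n =>
      -- n ≥ 1 on the range, so the Nat exponent (n*n).toNat equals n*n exactly
      let qn2 := pvPowMod q (n * n).toNat p
      let sign : Int := if PySem.Int.mod n 2 == 0 then 1 else p - 1
      PySem.Int.mod (result + 2 * sign * qn2) p) 1

-- ===== PORT B =====
def theta4_mod_p_alt (q : Int) (p : Int) (N : Option Int) : Int :=
  let Nv : Int := match N with
    | none => ((Nat.sqrt p.toNat : Nat) : Int) + 5
    | some n => n
  if Nv < 1 then 1
  else
    let cur := PySem.Int.mod q p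
    let mul := PySem.Int.mod (q ^ 3) p
    let qsq := PySem.Int.mod (q * q) p
    let acc := PySem.Int.mod (-cur) p
    let st := (PySem.List.pyRange 2 (Nv + 1)).foldl
      (fun (st : Int × Int × Int) n =>
        let cur := PySem.Int.mod (st.1 * st.2.1) p
        let mul := PySem.Int.mod (st.2.1 * qsq) p
        let acc := PySem.Int.mod (if PySem.Int.mod n 2 == 0 then st.2.2 + cur else st.2.2 - cur) p
        (cur, mul, acc)) (cur, mul, acc)
    PySem.Int.mod (1 + 2 * st.2.2) p

-- ===== PRECONDITION & SPEC =====
-- Pre_ excludes exactly the inputs on which A raises: p = 0 with at least one loop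
-- iteration (pow with modulus 0, ValueError) and N = None with p ≤ 0 (math.sqrt of a
-- negative, or modulus 0 after the default N is computed).
def Pre_theta4_mod_p (q : Int) (p : Int) (N : Option Int) : Prop :=
  (N.getD 1 < 1 ∨ p ≠ 0) ∧ (N = none → 0 < p)
instance (q : Int) (p : Int) (N : Option Int) : Decidable (Pre_theta4_mod_p q p N) := by unfold Pre_theta4_mod_p; infer_instance

def pvWitness_theta4_mod_p : Int × Int × Option Int := (3, 7, some 4)

def Spec_theta4_mod_p (q : Int) (p : Int) (N : Option Int) (out : Int) : Prop := out = theta4_mod_p_alt q p N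
instance (q : Int) (p : Int) (N : Option Int) (out : Int) : Decidable (Spec_theta4_mod_p q p N out) := by unfold Spec_theta4_mod_p; infer_instance

-- ===== CLAIM (what is proved, stated in full; the proofs are below) =====
def Claim_equal_theta4_mod_p : Prop := ∀ (q : Int) (p : Int) (N : Option Int), Dom_theta4_mod_p q p N → Pre_theta4_mod_p q p N → Spec_theta4_mod_p q p N (theta4_mod_p q p N)

-- ===== LEMMAS AND PROOFS =====

-- the exact signed partial sum  Σ_{n=1}^{k} (-1)^n q^(n²)
def pvS (q : Int) : Nat → Int
  | 0 => 0
  | k + 1 => pvS q k + (if (k + 1) % 2 == 0 then 1 else -1) * q ^ ((k + 1) * (k + 1))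

theorem pv_fmod_modEq (a p : Int) : Int.ModEq p (a.fmod p) a := by
  rw [Int.modEq_iff_dvd, Int.fmod_def]
  exact ⟨a.fdiv p, by ring⟩

theorem pv_fmod_congr {p x y : Int} (h : Int.ModEq p x y) : x.fmod p = y.fmod p := by
  rw [Int.fmod_eq_fmod_iff_fmod_sub_eq_zero]
  exact Int.fmod_eq_zero_of_dvd h.symm.dvd

theorem pv_mod_congr {p x y : Int} (h : Int.ModEq p x y) : PySem.Int.mod x p = y.fmod p :=
  pv_fmod_congr h

-- parity of a casted successor
theorem pv_parity_cast (k : Nat) :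
    (PySem.Int.mod ((k : Int) + 1) 2 == 0) = ((k + 1) % 2 == 0) := by
  have h1 : ((k : Int) + 1) = ((k + 1 : Nat) : Int) := by push_cast; ring
  have h2 : (2 : Int) = ((2 : Nat) : Int) := rfl
  rw [h1, h2, PySem.Int.mod_natCast]
  by_cases h : (k + 1) % 2 = 0
  · simp [h]
  · have h1 : (k + 1) % 2 = 1 := by omega
    simp [h1]

-- the Nat exponent in A equals (k+1)²
theorem pv_exp_cast (k : Nat) :
    ((((k : Int) + 1)) * (((k : Int) + 1))).toNat = (k + 1) * (k + 1) := by
  have : (((k : Int) + 1)) * (((k : Int) + 1)) = (((k + 1) * (k + 1) : Nat) : Int) := by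
    push_cast; ring
  rw [this, Int.toNat_natCast]

theorem pvPowMod_eq (b : Int) (e : Nat) (m : Int) : pvPowMod b e m = PySem.Int.powMod b e m := by
  rw [PySem.Int.powMod_eq]
  induction e using Nat.strong_induction_on with
  | _ e ih =>
    rw [pvPowMod]
    by_cases h : e = 0
    · subst h
      simp [PySem.Int.mod]
    · rw [dif_neg h]
      have ihh := ih (e / 2) (Nat.div_lt_self (Nat.pos_of_ne_zero h) (by omega))
      simp only [ihh]
      have hsq : PySem.Int.mod (PySem.Int.mod (b ^ (e / 2)) m * PySem.Int.mod (b ^ (e / 2)) m) m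
          = PySem.Int.mod (b ^ (e / 2) * b ^ (e / 2)) m := by
        exact pv_fmod_congr ((pv_fmod_modEq _ m).mul (pv_fmod_modEq _ m))
      by_cases hpar : e % 2 = 0
      · rw [if_pos hpar, hsq]
        have : b ^ (e / 2) * b ^ (e / 2) = b ^ e := by
          rw [← pow_add]; congr 1; omega
        rw [this]
      · rw [if_neg hpar]
        have : PySem.Int.mod (PySem.Int.mod (b ^ (e / 2)) m * PySem.Int.mod (b ^ (e / 2)) m) m
            = PySem.Int.mod (b ^ (e / 2) * b ^ (e / 2)) m := hsq
        rw [this]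
        have h2 : PySem.Int.mod (PySem.Int.mod (b ^ (e / 2) * b ^ (e / 2)) m * b) m
            = PySem.Int.mod (b ^ (e / 2) * b ^ (e / 2) * b) m :=
          pv_fmod_congr ((pv_fmod_modEq _ m).mul (Int.ModEq.refl b))
        rw [h2]
        have : b ^ (e / 2) * b ^ (e / 2) * b = b ^ e := by
          rw [← pow_add, ← pow_succ]; congr 1; omega
        rw [this]

-- A's loop, characterised (for at least one iteration)
theorem pvA_loop (q p : Int) (k : Nat) (hk : 1 ≤ k) :
    (PySem.List.pyRange 1 ((k : Int) + 1)).foldl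
      (fun result n =>
        let qn2 := pvPowMod q (n * n).toNat p
        let sign : Int := if PySem.Int.mod n 2 == 0 then 1 else p - 1
        PySem.Int.mod (result + 2 * sign * qn2) p) 1
    = (1 + 2 * pvS q k).fmod p := by
  induction k with
  | zero => omega
  | succ k ih =>
    by_cases hk1 : 1 ≤ k
    · -- step: range 1 (k+2) = range 1 (k+1) ++ [k+1]
      have hsplit : PySem.List.pyRange 1 ((↑(k + 1) : Int) + 1)
          = PySem.List.pyRange 1 ((k : Int) + 1) ++ [(k : Int) + 1] := by
        have : ((↑(k + 1) : Int) + 1) = ((k : Int) + 1) + 1 := by push_cast; ring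
        rw [this, PySem.List.pyRange_one_succ_right (by omega)]
      rw [hsplit, List.foldl_append, ih hk1]
      simp only [List.foldl_cons, List.foldl_nil]
      -- one step
      apply pv_mod_congr
      rw [pv_exp_cast, pv_parity_cast, pvPowMod_eq, PySem.Int.powMod_eq]
      by_cases hpar : ((k + 1) % 2 == 0) = true
      · have hsign : (if ((k + 1) % 2 == 0) = true then (1 : Int) else p - 1) = 1 := by
          simp [hpar]
        have hR : pvS q (k + 1) = pvS q k + 1 * q ^ ((k + 1) * (k + 1)) := by
          simp [pvS, hpar]
        rw [hsign]
        calc (1 + 2 * pvS q k).fmod p + 2 * 1 * PySem.Int.mod (q ^ ((k + 1) * (k + 1))) p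
            ≡ (1 + 2 * pvS q k) + 2 * 1 * q ^ ((k + 1) * (k + 1)) [ZMOD p] :=
              Int.ModEq.add (pv_fmod_modEq _ p) ((Int.ModEq.refl (2 * 1)).mul (pv_fmod_modEq _ p))
          _ = 1 + 2 * pvS q (k + 1) := by rw [hR]; ring
      · have hpar' : ((k + 1) % 2 == 0) = false := by
          cases h : ((k + 1) % 2 == 0) <;> simp_all
        have hsign : (if ((k + 1) % 2 == 0) = true then (1 : Int) else p - 1) = p - 1 := by
          simp [hpar']
        have hR : pvS q (k + 1) = pvS q k + (-1) * q ^ ((k + 1) * (k + 1)) := by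
          simp [pvS, hpar']
        have hs : Int.ModEq p (p - 1) (-1) := by
          rw [Int.modEq_iff_dvd]; exact ⟨-1, by ring⟩
        rw [hsign]
        calc (1 + 2 * pvS q k).fmod p + 2 * (p - 1) * PySem.Int.mod (q ^ ((k + 1) * (k + 1))) p
            ≡ (1 + 2 * pvS q k) + 2 * (-1) * q ^ ((k + 1) * (k + 1)) [ZMOD p] :=
              Int.ModEq.add (pv_fmod_modEq _ p) (((Int.ModEq.refl 2).mul hs).mul (pv_fmod_modEq _ p))
          _ = 1 + 2 * pvS q (k + 1) := by rw [hR]; ring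
    · -- base: k = 0, range 1 2 = [1]
      have hk0 : k = 0 := by omega
      subst hk0
      have hr : PySem.List.pyRange 1 ((((0 + 1 : Nat)) : Int) + 1) = [1] := by
        norm_num
        exact PySem.List.pyRange_one_singleton 1
      rw [hr]
      simp only [List.foldl_cons, List.foldl_nil]
      apply pv_mod_congr
      have hm : (PySem.Int.mod 1 2 == (0 : Int)) = false := by decide
      rw [hm, pvPowMod_eq, PySem.Int.powMod_eq]
      have hs : Int.ModEq p (p - 1) (-1) := by
        rw [Int.modEq_iff_dvd]; exact ⟨-1, by ring⟩
      have hR : pvS q (0 + 1) = -(q ^ (((1 : Int) * 1).toNat)) := by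
        simp [pvS]
      calc (1 : Int) + 2 * (if (false = true) then (1:Int) else p - 1) * PySem.Int.mod (q ^ (((1:Int) * 1).toNat)) p
          = 1 + 2 * (p - 1) * PySem.Int.mod (q ^ (((1:Int) * 1).toNat)) p := by norm_num
        _ ≡ 1 + 2 * (-1) * q ^ (((1:Int) * 1).toNat) [ZMOD p] :=
            (Int.ModEq.refl 1).add (((Int.ModEq.refl 2).mul hs).mul (pv_fmod_modEq _ p))
        _ = 1 + 2 * pvS q (0 + 1) := by rw [hR]; ring

-- B's loop invariant: the state is congruent to (q^(k²), q^(2k+1), pvS k) mod p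
theorem pvB_loop (q p : Int) (k : Nat) (hk : 1 ≤ k) :
    Int.ModEq p
      (((PySem.List.pyRange 2 ((k : Int) + 1)).foldl
        (fun (st : Int × Int × Int) n =>
          let cur := PySem.Int.mod (st.1 * st.2.1) p
          let mul := PySem.Int.mod (st.2.1 * PySem.Int.mod (q * q) p) p
          let acc := PySem.Int.mod (if PySem.Int.mod n 2 == 0 then st.2.2 + cur else st.2.2 - cur) p
          (cur, mul, acc))
        (PySem.Int.mod q p, PySem.Int.mod (q ^ 3) p, PySem.Int.mod (-(PySem.Int.mod q p)) p)).2.2)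
      (pvS q k) := by
  -- strengthened invariant on all three components
  suffices h : ∀ (st : Int × Int × Int), st =
      (PySem.List.pyRange 2 ((k : Int) + 1)).foldl
        (fun (st : Int × Int × Int) n =>
          let cur := PySem.Int.mod (st.1 * st.2.1) p
          let mul := PySem.Int.mod (st.2.1 * PySem.Int.mod (q * q) p) p
          let acc := PySem.Int.mod (if PySem.Int.mod n 2 == 0 then st.2.2 + cur else st.2.2 - cur) p
          (cur, mul, acc))
        (PySem.Int.mod q p, PySem.Int.mod (q ^ 3) p, PySem.Int.mod (-(PySem.Int.mod q p)) p) →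
      Int.ModEq p st.1 (q ^ (k * k)) ∧ Int.ModEq p st.2.1 (q ^ (2 * k + 1)) ∧
        Int.ModEq p st.2.2 (pvS q k) by
    exact (h _ rfl).2.2
  induction k with
  | zero => omega
  | succ k ih =>
    intro st hst
    by_cases hk1 : 1 ≤ k
    · have hsplit : PySem.List.pyRange 2 ((↑(k + 1) : Int) + 1)
          = PySem.List.pyRange 2 ((k : Int) + 1) ++ [(k : Int) + 1] := by
        have : ((↑(k + 1) : Int) + 1) = ((k : Int) + 1) + 1 := by push_cast; ring
        rw [this, PySem.List.pyRange_one_succ_right (by omega)]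
      rw [hsplit, List.foldl_append] at hst
      obtain ⟨h1, h2, h3⟩ := ih hk1 _ rfl
      set prev := (PySem.List.pyRange 2 ((k : Int) + 1)).foldl
        (fun (st : Int × Int × Int) n =>
          let cur := PySem.Int.mod (st.1 * st.2.1) p
          let mul := PySem.Int.mod (st.2.1 * PySem.Int.mod (q * q) p) p
          let acc := PySem.Int.mod (if PySem.Int.mod n 2 == 0 then st.2.2 + cur else st.2.2 - cur) p
          (cur, mul, acc))
        (PySem.Int.mod q p, PySem.Int.mod (q ^ 3) p, PySem.Int.mod (-(PySem.Int.mod q p)) p) with hprev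
      simp only [List.foldl_cons, List.foldl_nil] at hst
      subst hst
      have hcur : Int.ModEq p (PySem.Int.mod (prev.1 * prev.2.1) p) (q ^ ((k+1) * (k+1))) := by
        have : q ^ (k * k) * q ^ (2 * k + 1) = q ^ ((k + 1) * (k + 1)) := by
          rw [← pow_add]; ring_nf
        calc (PySem.Int.mod (prev.1 * prev.2.1) p)
            ≡ prev.1 * prev.2.1 [ZMOD p] := pv_fmod_modEq _ p
          _ ≡ q ^ (k * k) * q ^ (2 * k + 1) [ZMOD p] := h1.mul h2
          _ = q ^ ((k + 1) * (k + 1)) := this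
      refine ⟨hcur, ?_, ?_⟩
      · have : q ^ (2 * k + 1) * (q * q) = q ^ (2 * (k + 1) + 1) := by
          rw [show q * q = q ^ 2 by ring, ← pow_add]
          try congr 1
          try omega
        calc (PySem.Int.mod (prev.2.1 * PySem.Int.mod (q * q) p) p)
            ≡ prev.2.1 * PySem.Int.mod (q * q) p [ZMOD p] := pv_fmod_modEq _ p
          _ ≡ q ^ (2 * k + 1) * (q * q) [ZMOD p] := h2.mul (pv_fmod_modEq _ p)
          _ = q ^ (2 * (k + 1) + 1) := this
      · rw [pv_parity_cast]
        show Int.ModEq p _ (pvS q (k + 1))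
        by_cases hpar : ((k + 1) % 2 == 0) = true
        · rw [if_pos hpar]
          calc (PySem.Int.mod (prev.2.2 + PySem.Int.mod (prev.1 * prev.2.1) p) p)
              ≡ prev.2.2 + PySem.Int.mod (prev.1 * prev.2.1) p [ZMOD p] := pv_fmod_modEq _ p
            _ ≡ pvS q k + q ^ ((k + 1) * (k + 1)) [ZMOD p] := h3.add hcur
            _ = pvS q (k + 1) := by simp [pvS, hpar]
        · have hpar' : ((k + 1) % 2 == 0) = false := by
            cases h : ((k + 1) % 2 == 0) <;> simp_all
          rw [hpar', if_neg (by simp)]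
          calc (PySem.Int.mod (prev.2.2 - PySem.Int.mod (prev.1 * prev.2.1) p) p)
              ≡ prev.2.2 - PySem.Int.mod (prev.1 * prev.2.1) p [ZMOD p] := pv_fmod_modEq _ p
            _ ≡ pvS q k - q ^ ((k + 1) * (k + 1)) [ZMOD p] := h3.sub hcur
            _ = pvS q (k + 1) := by simp [pvS, hpar']; ring
    · -- base: k = 0, range 2 2 = []
      have hk0 : k = 0 := by omega
      subst hk0
      have hnil : PySem.List.pyRange 2 ((((0 + 1 : Nat)) : Int) + 1) = [] := by
        apply PySem.List.pyRange_one_eq_nil; norm_num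
      rw [hnil] at hst
      simp only [List.foldl_nil] at hst
      subst hst
      refine ⟨?_, ?_, ?_⟩
      · simpa using pv_fmod_modEq q p
      · simpa using pv_fmod_modEq (q ^ 3) p
      · have : pvS q 1 = -q := by simp [pvS]
        rw [this]
        calc (PySem.Int.mod (-(PySem.Int.mod q p)) p)
            ≡ -(PySem.Int.mod q p) [ZMOD p] := pv_fmod_modEq _ p
          _ ≡ -q [ZMOD p] := (pv_fmod_modEq q p).neg

-- the two loops agree for every effective bound Nv
theorem pv_main (q p Nv : Int) :
    (PySem.List.pyRange 1 (Nv + 1)).foldl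
      (fun result n =>
        let qn2 := pvPowMod q (n * n).toNat p
        let sign : Int := if PySem.Int.mod n 2 == 0 then 1 else p - 1
        PySem.Int.mod (result + 2 * sign * qn2) p) 1
    = if Nv < 1 then 1
      else PySem.Int.mod (1 + 2 *
        ((PySem.List.pyRange 2 (Nv + 1)).foldl
          (fun (st : Int × Int × Int) n =>
            let cur := PySem.Int.mod (st.1 * st.2.1) p
            let mul := PySem.Int.mod (st.2.1 * PySem.Int.mod (q * q) p) p
            let acc := PySem.Int.mod (if PySem.Int.mod n 2 == 0 then st.2.2 + cur else st.2.2 - cur) p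
            (cur, mul, acc))
          (PySem.Int.mod q p, PySem.Int.mod (q ^ 3) p, PySem.Int.mod (-(PySem.Int.mod q p)) p)).2.2) p := by
  by_cases hs : Nv < 1
  · rw [if_pos hs, PySem.List.pyRange_one_eq_nil (by omega), List.foldl_nil]
  · rw [if_neg hs]
    have hcast : Nv = ((Nv.toNat : Nat) : Int) := by omega
    rw [hcast, pvA_loop q p Nv.toNat (by omega)]
    exact (pv_mod_congr ((Int.ModEq.refl 1).add
      ((Int.ModEq.refl 2).mul (pvB_loop q p Nv.toNat (by omega))))).symm

-- ===== VERDICT (by name: the statement is the Claim_ definition above) =====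
theorem theta4_mod_p_spec : Claim_equal_theta4_mod_p := by
  intro q p N _ _
  show theta4_mod_p q p N = theta4_mod_p_alt q p N
  cases N with
  | none => exact pv_main q p (((Nat.sqrt p.toNat : Nat) : Int) + 5)
  | some n => exact pv_main q p n
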